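-- pv_equiv track=rewrite | github.com/maulusck/tools | python/ansible-varfinder.py | build_line_map
-- ===== SOURCE A (Python) =====
-- def build_line_map(lines: list[str]) -> dict[str, int]:
--     stack, line_map = [], {}
--     for i, line in enumerate(lines):
--         if line.strip() and not line.lstrip().startswith("#"):
--             indent = len(line) - len(line.lstrip())
--             key = line.lstrip().split(":")[0].strip()
--             while stack and stack[-1][1] >= indent:
--                 stack.pop()
--             stack.append((key, indent))
--             line_map[".".join(k for k, _ in stack)] = i + 1
--     return line_map
-- ===== SOURCE B (Python) =====
-- def build_line_map(lines: list[str]) -> dict[str, int]: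
--     # Two staged passes instead of an online mutable stack: first extract the
--     # significant lines as (lineno, indent, key) triples (plus running prefix
--     # minima of the indents), then derive each dotted path by walking the
--     # earlier triples backwards along strictly decreasing indents, stopping as
--     # soon as the prefix minimum shows no smaller indent can remain.
--     sig = []
--     premins = []
--     for i, line in enumerate(lines):
--         stripped = line.lstrip()
--         if line.strip() and not stripped.startswith("#"):
--             indent = len(line) - len(stripped)
--             sig.append((i + 1, indent, stripped.split(":")[0].strip()))
--             premins.append(indent if not premins or indent < premins[-1] else premins[-1])
--     line_map = {}
--     for j, (lineno, indent, key) in enumerate(sig):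
--         parts, bound = [key], indent
--         for t in range(j - 1, -1, -1):
--             if premins[t] >= bound:
--                 break
--             ind2 = sig[t][1]
--             if ind2 < bound:
--                 bound = ind2
--                 parts.append(sig[t][2])
--         line_map[".".join(reversed(parts))] = lineno
--     return line_map
-- ===== Notes on version B (the rewrite author's own statement) =====
-- stated objective: alternative
-- what changed: B replaces A's single-pass mutable (key,indent) stack by two staged passes: first extract the significant lines as (lineno, indent, key) triples together with running prefix minima of the indents, then compute each dotted path by a backward scan over the earlier triples along strictly decreasing indents, cut short once the prefix minimum shows no smaller indent remains.
import Mathlib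
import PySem

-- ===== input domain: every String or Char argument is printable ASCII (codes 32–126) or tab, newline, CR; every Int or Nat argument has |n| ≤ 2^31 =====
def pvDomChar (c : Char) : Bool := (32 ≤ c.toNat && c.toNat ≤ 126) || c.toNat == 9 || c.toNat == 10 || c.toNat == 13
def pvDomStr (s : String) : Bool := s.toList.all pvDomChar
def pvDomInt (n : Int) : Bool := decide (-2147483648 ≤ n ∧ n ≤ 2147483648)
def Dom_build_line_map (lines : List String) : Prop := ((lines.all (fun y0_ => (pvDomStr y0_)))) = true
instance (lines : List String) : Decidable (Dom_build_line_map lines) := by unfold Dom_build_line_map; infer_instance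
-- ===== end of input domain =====

-- B replaces A's online mutable (key, indent) stack by two staged passes: extract the
-- significant lines as (lineno, indent, key) triples annotated with running prefix minima
-- of the indents, then compute each dotted path by a backward scan over the earlier triples
-- along strictly decreasing indents, stopping early once the prefix minimum shows no smaller
-- indent remains (objective: alternative decomposition; same returned dict).

-- ===== PORT A =====
-- the 'while stack and stack[-1][1] >= indent: stack.pop()' loop; the stack is kept TOP-FIRST
def pvPopA (indent : Int) : List (String × Int) → List (String × Int)
  | [] => []
  | (k, ind) :: rest => if ind ≥ indent then pvPopA indent rest else (k, ind) :: rest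

def build_line_map (lines : List String) : List (String × Int) :=
  (((PySem.List.enumerate lines 0).foldl
    (fun (st : List (String × Int) × PySem.Dict String Int) p =>
      let (stack, line_map) := st
      let (i, line) := p
      if (PySem.Str.strip line ≠ "") ∧ (PySem.Str.startswith (PySem.Str.lstrip line) "#" = false) then
        let indent : Int := (PySem.Str.len line : Int) - (PySem.Str.len (PySem.Str.lstrip line) : Int)
        let key := PySem.Str.strip (((PySem.Str.split? (PySem.Str.lstrip line) ":").getD []).headD "")
        let stack' := (key, indent) :: pvPopA indent stack
        (stack', line_map.insert (PySem.Str.join "." (stack'.reverse.map (·.1))) (i + 1))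
      else st)
    ([], PySem.Dict.empty)).2).items

-- ===== PORT B =====
-- 'indent if not premins or indent < premins[-1] else premins[-1]' (m = last premin)
def pvNewMin (m : Option Int) (d : Int) : Int :=
  match m with | none => d | some v => if d < v then d else v

-- pass 1: the significant lines as (premin, lineno, indent, key) quadruples, `premin`
-- being the running minimum of the indents so far ('premins' in Source B; m = last premin)
def pvSigB : List String → Int → Option Int → List (Int × Int × Int × String)
  | [], _, _ => []
  | line :: rest, i, m =>
    let stripped := PySem.Str.lstrip line
    if (PySem.Str.strip line ≠ "") ∧ (PySem.Str.startswith stripped "#" = false) then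
      let ind : Int := (PySem.Str.len line : Int) - (PySem.Str.len stripped : Int)
      let m' : Int := pvNewMin m ind
      (m', i + 1, ind, PySem.Str.strip (((PySem.Str.split? stripped ":").getD []).headD ""))
        :: pvSigB rest (i + 1) (some m')
    else pvSigB rest (i + 1) m

-- the inner 'for t in range(j-1, -1, -1)' backward scan (rprev = sig[:j] nearest-first),
-- with the 'if premins[t] >= bound: break' early exit
def pvScanB : List (Int × Int × Int × String) → Int → List String
  | [], _ => []
  | (pm, _, ind2, k2) :: rest, bound =>
    if pm ≥ bound then []
    else if ind2 < bound then k2 :: pvScanB rest ind2 else pvScanB rest bound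

-- pass 2: 'for j, (lineno, indent, key) in enumerate(sig)', carrying sig[:j] reversed
def pvPass2B : List (Int × Int × Int × String) → List (Int × Int × Int × String) →
    PySem.Dict String Int → PySem.Dict String Int
  | [], _, lm => lm
  | (pm, ln, ind, key) :: rest, rprev, lm =>
    pvPass2B rest ((pm, ln, ind, key) :: rprev)
      (lm.insert (PySem.Str.join "." (key :: pvScanB rprev ind).reverse) ln)

def build_line_map_alt (lines : List String) : List (String × Int) :=
  (pvPass2B (pvSigB lines 0 none) [] PySem.Dict.empty).items

-- ===== PRECONDITION & SPEC =====
def Spec_build_line_map (lines : List String) (out : List (String × Int)) : Prop := out = build_line_map_alt lines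
instance (lines : List String) (out : List (String × Int)) : Decidable (Spec_build_line_map lines out) := by unfold Spec_build_line_map; infer_instance

-- ===== CLAIM (what is proved, stated in full; the proofs are below) =====
def Claim_equal_build_line_map : Prop := ∀ (lines : List String), Dom_build_line_map lines → Spec_build_line_map lines (build_line_map lines)

-- ===== LEMMAS AND PROOFS =====

-- the backward scan with (key, indent) pairs: the portion of A's stack strictly below `bound`
def pvChainT : List (Int × Int × Int × String) → Int → List (String × Int)
  | [], _ => []
  | (_, _, ind2, k2) :: rest, bound =>
    if ind2 < bound then (k2, ind2) :: pvChainT rest ind2 else pvChainT rest bound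

-- A's whole stack, reconstructed from the reversed list of significant quadruples
def pvStackT : List (Int × Int × Int × String) → List (String × Int)
  | [] => []
  | (_, _, ind, k) :: rest => (k, ind) :: pvChainT rest ind

-- the premin annotations are genuine suffix minima (suffix of rprev = prefix of sig)
def pvGoodMin : List (Int × Int × Int × String) → Prop
  | [] => True
  | (pm, _, ind, _) :: rest => (pm ≤ ind ∧ ∀ q ∈ rest, pm ≤ q.2.2.1) ∧ pvGoodMin rest

lemma pvChainT_nil_of_ge (rp : List (Int × Int × Int × String)) (bound : Int)
    (h : ∀ q ∈ rp, bound ≤ q.2.2.1) : pvChainT rp bound = [] := by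
  induction rp with
  | nil => rfl
  | cons q rest ih =>
    obtain ⟨pm2, ln2, ind2, k2⟩ := q
    have h1 : bound ≤ ind2 := h _ (List.mem_cons_self ..)
    simp only [pvChainT]
    rw [if_neg (by omega)]
    exact ih (fun q hq => h q (List.mem_cons_of_mem _ hq))

lemma pvScanB_eq_map_fst (rp : List (Int × Int × Int × String)) (bound : Int)
    (hg : pvGoodMin rp) : pvScanB rp bound = (pvChainT rp bound).map (·.1) := by
  induction rp generalizing bound with
  | nil => rfl
  | cons p rest ih =>
    obtain ⟨pm, ln2, ind2, k2⟩ := p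
    obtain ⟨⟨hpm, hall⟩, hrest⟩ := hg
    simp only [pvScanB, pvChainT]
    by_cases hb : pm ≥ bound
    · rw [if_pos hb, if_neg (by omega),
        pvChainT_nil_of_ge rest bound (fun q hq => le_trans hb (hall q hq))]
      rfl
    · rw [if_neg hb]
      split_ifs with h
      · simp [ih ind2 hrest]
      · exact ih bound hrest

lemma pvPopA_chainT (rest : List (Int × Int × Int × String)) (ind d : Int) (h : d ≤ ind) :
    pvPopA d (pvChainT rest ind) = pvChainT rest d := by
  induction rest generalizing ind with
  | nil => rfl
  | cons p r2 ih =>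
    obtain ⟨pm2, ln2, i2, k2⟩ := p
    simp only [pvChainT]
    by_cases h1 : i2 < ind
    · rw [if_pos h1]
      simp only [pvPopA]
      by_cases h2 : i2 < d
      · rw [if_neg (by omega), if_pos h2]
      · rw [if_pos (by omega), if_neg h2, ih i2 (by omega)]
    · rw [if_neg h1, if_neg (by omega), ih ind h]

lemma pvPopA_stackT (rp : List (Int × Int × Int × String)) (d : Int) :
    pvPopA d (pvStackT rp) = pvChainT rp d := by
  cases rp with
  | nil => rfl
  | cons p rest =>
    obtain ⟨pm, ln, ind, k⟩ := p
    simp only [pvStackT, pvChainT, pvPopA]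
    by_cases h1 : ind < d
    · rw [if_neg (by omega), if_pos h1]
    · rw [if_pos (by omega), if_neg h1, pvPopA_chainT rest ind d (by omega)]

-- main invariant: A's fold from the stack represented by the reversed quadruples `rprev`
-- equals B's pass 2 over the remaining quadruples of pass 1; `m` is the running minimum
lemma pv_main (lines : List String) :
    ∀ (s : Int) (rprev : List (Int × Int × Int × String)) (m : Option Int)
      (lm : PySem.Dict String Int),
    pvGoodMin rprev →
    (match rprev with | [] => m = none | q :: _ => m = some q.1) →
    ((PySem.List.enumerate lines s).foldl
      (fun (st : List (String × Int) × PySem.Dict String Int) p =>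
        let (stack, line_map) := st
        let (i, line) := p
        if (PySem.Str.strip line ≠ "") ∧ (PySem.Str.startswith (PySem.Str.lstrip line) "#" = false) then
          let indent : Int := (PySem.Str.len line : Int) - (PySem.Str.len (PySem.Str.lstrip line) : Int)
          let key := PySem.Str.strip (((PySem.Str.split? (PySem.Str.lstrip line) ":").getD []).headD "")
          let stack' := (key, indent) :: pvPopA indent stack
          (stack', line_map.insert (PySem.Str.join "." (stack'.reverse.map (·.1))) (i + 1))
        else st)
      (pvStackT rprev, lm)).2
    = pvPass2B (pvSigB lines s m) rprev lm := by
  induction lines with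
  | nil => intro s rprev m lm _ _; rfl
  | cons line rest ih =>
    intro s rprev m lm hg hm
    rw [PySem.List.enumerate_cons]
    simp only [List.foldl_cons, pvSigB]
    by_cases hc : (PySem.Str.strip line ≠ "") ∧ (PySem.Str.startswith (PySem.Str.lstrip line) "#" = false)
    · rw [if_pos hc]
      simp only [if_pos hc]
      set d : Int := (PySem.Str.len line : Int) - (PySem.Str.len (PySem.Str.lstrip line) : Int) with hd
      set key := PySem.Str.strip (((PySem.Str.split? (PySem.Str.lstrip line) ":").getD []).headD "") with hk
      have hmle : (pvNewMin m d) ≤ d := by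
        cases m with
        | none => exact le_refl d
        | some v => simp only [pvNewMin]; split_ifs <;> omega
      have hmmin : ∀ q ∈ rprev,
          (pvNewMin m d) ≤ q.2.2.1 := by
        intro q hq
        cases rprev with
        | nil => simp at hq
        | cons q0 r2 =>
          obtain ⟨⟨hq0, hall0⟩, _⟩ := hg
          simp only [] at hm
          rw [hm]
          have h1 : pvNewMin (some q0.1) d ≤ q0.1 := by
            simp only [pvNewMin]; split_ifs <;> omega
          rcases List.mem_cons.mp hq with hq | hq
          · subst hq; exact le_trans h1 hq0
          · exact le_trans (le_trans h1 (hall0 q hq)) (le_refl _)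
      have hgood : pvGoodMin (((pvNewMin m d),
          s + 1, d, key) :: rprev) := ⟨⟨hmle, hmmin⟩, hg⟩
      have hstack : (key, d) :: pvPopA d (pvStackT rprev)
          = pvStackT (((pvNewMin m d),
            s + 1, d, key) :: rprev) := by
        rw [pvPopA_stackT]; rfl
      have hpath : PySem.Str.join "." (((key, d) :: pvPopA d (pvStackT rprev)).reverse.map (·.1))
          = PySem.Str.join "." (key :: pvScanB rprev d).reverse := by
        rw [pvPopA_stackT, pvScanB_eq_map_fst rprev d hg]
        simp
      rw [hpath, hstack, pvPass2B]
      exact ih (s + 1) _ (some (pvNewMin m d)) _ hgood rfl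
    · rw [if_neg hc]
      simp only [if_neg hc]
      exact ih (s + 1) rprev m lm hg hm

-- ===== VERDICT (by name: the statement is the Claim_ definition above) =====
theorem build_line_map_spec : Claim_equal_build_line_map := by
  intro lines _
  show build_line_map lines = build_line_map_alt lines
  unfold build_line_map build_line_map_alt
  rw [show ([] : List (String × Int)) = pvStackT [] from rfl,
    pv_main lines 0 [] none PySem.Dict.empty trivial rfl]
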